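-- pv_equiv track=rewrite | github.com/Coohrentiin/Research_Engine | TDD/Corentin_fuctions/ToFractions.py | PrimaryNumbers
-- ===== SOURCE A (Python) =====
-- def PrimaryNumbers(number):
--     primaryNumList=[]
--     divisor=1
--     while divisor<=number:
--         quo=number//divisor
--         rest=number-quo*divisor
--         if rest==0:
--             primaryNumList.append(divisor)
--             number=quo
--         divisor+=1
--     return(primaryNumList)
-- ===== SOURCE B (Python) =====
-- def PrimaryNumbers(number):
--     # Greedy increasing-divisor decomposition: instead of scanning every
--     # candidate divisor up to number, find the smallest divisor greater than
--     # the previous one via a sqrt(cur) divisor enumeration and divide.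
--     res = []
--     prev = 0
--     cur = number
--     while cur > prev:
--         best = cur  # cur itself is a divisor of cur greater than prev
--         i = 1
--         while i * i <= cur:
--             if cur % i == 0:
--                 for d in (i, cur // i):
--                     if prev < d < best:
--                         best = d
--             i += 1
--         res.append(best)
--         cur //= best
--         prev = best
--     return res
-- ===== Notes on version B (the rewrite author's own statement) =====
-- stated objective: faster
-- what changed: replaces A's linear scan of every candidate divisor (divisor += 1 up to the shrinking number) by repeatedly locating the smallest divisor above the previous one through a sqrt(cur) divisor enumeration, so only ~log(n) divide steps of cost O(sqrt n) are performed
import Mathlib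
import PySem

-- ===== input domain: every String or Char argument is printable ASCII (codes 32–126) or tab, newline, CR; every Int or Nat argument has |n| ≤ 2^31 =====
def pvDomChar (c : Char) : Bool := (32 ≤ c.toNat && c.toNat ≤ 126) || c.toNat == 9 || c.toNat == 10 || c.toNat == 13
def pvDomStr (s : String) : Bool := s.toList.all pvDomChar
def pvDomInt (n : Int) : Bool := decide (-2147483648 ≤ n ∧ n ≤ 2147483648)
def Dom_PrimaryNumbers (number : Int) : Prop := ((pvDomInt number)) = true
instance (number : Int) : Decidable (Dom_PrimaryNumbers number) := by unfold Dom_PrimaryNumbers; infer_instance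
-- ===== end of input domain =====

-- B replaces A's linear divisor scan by repeated smallest-divisor search via a sqrt(cur)
-- divisor enumeration (objective: faster). Same return value for every int input.

-- ===== PORT A =====
-- A's while loop; on number ≥ 1 every loop state has number ≥ 1 and divisor ≥ 1, so the
-- Nat state (entered via toNat, identity on the reachable values; number < 1 exits the
-- loop at once in both) computes exactly Python's values: `//` = Nat division, and
-- `rest = number - quo*divisor` never truncates since quo*divisor ≤ number.
theorem pvPLdec1 (number divisor : Nat) (h : divisor ≤ number) :
    number / divisor + 1 - (divisor + 1) < number + 1 - divisor := by
  have h2 := Nat.div_le_self number divisor; omega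

theorem pvPLdec2 (number divisor : Nat) (h : divisor ≤ number) :
    number + 1 - (divisor + 1) < number + 1 - divisor := by omega

def PrimaryNumbersLoop (number divisor : Nat) : List Int :=
  if divisor ≤ number then
    if number - number / divisor * divisor = 0 then
      (divisor : Int) :: PrimaryNumbersLoop (number / divisor) (divisor + 1)
    else PrimaryNumbersLoop number (divisor + 1)
  else []
termination_by number + 1 - divisor
decreasing_by
  · exact pvPLdec1 number divisor ‹_›
  · exact pvPLdec2 number divisor ‹_›

def PrimaryNumbers (number : Int) : List Int := PrimaryNumbersLoop number.toNat 1

-- ===== PORT B =====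
-- `if prev < d < best: best = d` of Source B
def bestUpd (prev d best : Nat) : Nat := if prev < d ∧ d < best then d else best

theorem pvBLdec (cur i : Nat) (h : i * i ≤ cur) : cur + 1 - (i + 1) < cur + 1 - i := by
  have h2 : i ≤ i * i := by
    rcases Nat.eq_zero_or_pos i with h | h
    · simp [h]
    · exact Nat.le_mul_of_pos_left i h
  omega

-- inner `while i * i <= cur` loop of Source B (running minimum over divisor candidates)
def bestLoop (cur prev i best : Nat) : Nat :=
  if i * i ≤ cur then
    bestLoop cur prev (i + 1)
      (if cur % i = 0 then bestUpd prev (cur / i) (bestUpd prev i best) else best)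
  else best
termination_by cur + 1 - i
decreasing_by
  exact pvBLdec cur i ‹_›

-- facts the outer loop needs for termination
theorem bestUpd_le_self (prev d best : Nat) : bestUpd prev d best ≤ best := by
  unfold bestUpd; split <;> omega

theorem bestLoop_le_best (cur prev : Nat) : ∀ i best, bestLoop cur prev i best ≤ best := by
  intro i best
  induction i, best using bestLoop.induct cur prev with
  | case1 i best h ih =>
      rw [bestLoop, if_pos h]
      refine le_trans ih ?_
      split
      · exact le_trans (bestUpd_le_self _ _ _) (bestUpd_le_self _ _ _)
      · exact le_refl _
  | case2 i best h => rw [bestLoop, if_neg h]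

theorem bestLoop_gt_prev (cur prev : Nat) : ∀ i best, prev < best → prev < bestLoop cur prev i best := by
  intro i best
  induction i, best using bestLoop.induct cur prev with
  | case1 i best h ih =>
      intro hb
      rw [bestLoop, if_pos h]
      apply ih
      split
      · unfold bestUpd; split <;> split <;> omega
      · exact hb
  | case2 i best h => intro hb; rw [bestLoop, if_neg h]; exact hb

theorem pvALdec (cur prev : Nat) (h : prev < cur) :
    2 * (cur / bestLoop cur prev 1 cur) + (cur / bestLoop cur prev 1 cur - bestLoop cur prev 1 cur)
      < 2 * cur + (cur - prev) := by
  have hb1 : prev < bestLoop cur prev 1 cur := bestLoop_gt_prev cur prev 1 cur h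
  have hb2 : bestLoop cur prev 1 cur ≤ cur := bestLoop_le_best cur prev 1 cur
  rcases Nat.lt_or_ge (bestLoop cur prev 1 cur) 2 with hb | hb
  · have hb1' : bestLoop cur prev 1 cur = 1 := by omega
    rw [hb1', Nat.div_one]
    omega
  · have h1 : cur / bestLoop cur prev 1 cur ≤ cur / 2 := Nat.div_le_div_left hb (by omega)
    omega

-- outer `while cur > prev` loop of Source B
def altLoop (cur prev : Nat) : List Int :=
  if prev < cur then
    (bestLoop cur prev 1 cur : Int) ::
      altLoop (cur / bestLoop cur prev 1 cur) (bestLoop cur prev 1 cur)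
  else []
termination_by 2 * cur + (cur - prev)
decreasing_by
  exact pvALdec cur prev ‹_›

def PrimaryNumbers_alt (number : Int) : List Int := altLoop number.toNat 0

-- ===== PRECONDITION & SPEC =====
def Spec_PrimaryNumbers (number : Int) (out : List Int) : Prop := out = PrimaryNumbers_alt number
instance (number : Int) (out : List Int) : Decidable (Spec_PrimaryNumbers number out) := by unfold Spec_PrimaryNumbers; infer_instance

-- ===== CLAIM (what is proved, stated in full; the proofs are below) =====
def Claim_equal_PrimaryNumbers : Prop := ∀ (number : Int), Dom_PrimaryNumbers number → Spec_PrimaryNumbers number (PrimaryNumbers number)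

-- ===== LEMMAS AND PROOFS =====

theorem bestUpd_le_d (prev d best : Nat) (h : prev < d) : bestUpd prev d best ≤ d := by
  unfold bestUpd; split <;> omega

-- bestLoop returns a divisor of cur whenever its running best is one
theorem bestLoop_dvd (cur prev : Nat) : ∀ i best, best ∣ cur → bestLoop cur prev i best ∣ cur := by
  intro i best
  induction i, best using bestLoop.induct cur prev with
  | case1 i best h ih =>
      intro hb
      rw [bestLoop, if_pos h]
      apply ih
      split
      · rename_i hmod
        have hidvd : i ∣ cur := Nat.dvd_of_mod_eq_zero hmod
        have hqdvd : cur / i ∣ cur := Nat.div_dvd_of_dvd hidvd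
        unfold bestUpd; split <;> split <;> assumption
      · exact hb
  | case2 i best h => intro hb; rw [bestLoop, if_neg h]; exact hb

-- bestLoop result is ≤ any divisor candidate (> prev) still to be visited
theorem bestLoop_le_cand (cur prev : Nat) :
    ∀ i best k, prev < k → k ∣ cur →
      (∃ j, i ≤ j ∧ j * j ≤ cur ∧ j ∣ cur ∧ (k = j ∨ k = cur / j)) →
      bestLoop cur prev i best ≤ k := by
  intro i best
  induction i, best using bestLoop.induct cur prev with
  | case1 i best h ih =>
      rintro k hk hkd ⟨j, hij, hjj, hjd, hkj⟩
      rw [bestLoop, if_pos h]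
      rcases Nat.lt_or_ge i j with hlt | hge
      · exact ih k hk hkd ⟨j, hlt, hjj, hjd, hkj⟩
      · -- j = i : k is processed now, the new best is ≤ k
        have hji : j = i := by omega
        have hmod : cur % i = 0 := by
          rw [← hji]; exact Nat.mod_eq_zero_of_dvd hjd
        rw [if_pos hmod]
        refine le_trans (bestLoop_le_best cur prev (i + 1) _) ?_
        rcases hkj with rfl | rfl
        · -- k = j : the inner bestUpd already brought best down to ≤ k
          rw [hji]
          exact le_trans (bestUpd_le_self _ _ _) (bestUpd_le_d _ _ _ (hji ▸ hk))
        · -- k = cur / j : the outer bestUpd brings best down to ≤ k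
          rw [hji]
          exact bestUpd_le_d _ _ _ (hji ▸ hk)
  | case2 i best h =>
      rintro k hk hkd ⟨j, hij, hjj, hjd, hkj⟩
      exact absurd (le_trans (Nat.mul_le_mul hij hij) hjj) h

-- every divisor of cur (cur ≥ 1) appears as a candidate from index 1
theorem cand_cover (cur k : Nat) (hc : 1 ≤ cur) (hk1 : 1 ≤ k) (hkd : k ∣ cur) :
    ∃ j, 1 ≤ j ∧ j * j ≤ cur ∧ j ∣ cur ∧ (k = j ∨ k = cur / j) := by
  rcases Nat.lt_or_ge cur (k * k) with hbig | hsmall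
  · -- k is above √cur: its cofactor j = cur / k is the witness
    obtain ⟨j, hj⟩ := hkd
    have hj1 : 1 ≤ j := by nlinarith [hj]
    have hjk : cur / k = j := by rw [hj]; exact Nat.mul_div_cancel_left j (by omega)
    refine ⟨j, hj1, ?_, ⟨k, by rw [hj, Nat.mul_comm]⟩, Or.inr ?_⟩
    · have hjlt : j < k := by nlinarith [hj]
      nlinarith [hj]
    · rw [hj, Nat.mul_div_assoc k (dvd_refl j), Nat.div_self (by omega), Nat.mul_one]
  · exact ⟨k, hk1, hsmall, hkd, Or.inl rfl⟩

-- the full spec of the inner search: smallest divisor of cur greater than prev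
theorem best_spec (cur prev : Nat) (h : prev < cur) :
    prev < bestLoop cur prev 1 cur ∧ bestLoop cur prev 1 cur ∣ cur ∧
      ∀ k, prev < k → k ∣ cur → bestLoop cur prev 1 cur ≤ k := by
  refine ⟨bestLoop_gt_prev cur prev 1 cur h, bestLoop_dvd cur prev 1 cur dvd_rfl, ?_⟩
  intro k hk hkd
  exact bestLoop_le_cand cur prev 1 cur k hk hkd
    (cand_cover cur k (by omega) (by omega) hkd)

-- A's scan steps past every non-divisor between j and b without output
theorem ALoop_step (cur b : Nat) (hbc : b ≤ cur) :
    ∀ m j, b - j ≤ m → j ≤ b → (∀ k, j ≤ k → k < b → ¬ k ∣ cur) →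
      PrimaryNumbersLoop cur j = PrimaryNumbersLoop cur b := by
  intro m
  induction m with
  | zero =>
      intro j h1 h2 _
      have hjb : j = b := by omega
      rw [hjb]
  | succ m ih =>
      intro j h1 h2 hmin
      rcases Nat.eq_or_lt_of_le h2 with rfl | hjlt
      · rfl
      · have hjc : j ≤ cur := by omega
        have hnd : ¬ j ∣ cur := hmin j (le_refl j) hjlt
        have hrest : cur - cur / j * j ≠ 0 := by
          have hdm := Nat.div_add_mod cur j
          have hcm : j * (cur / j) = cur / j * j := Nat.mul_comm _ _
          intro h0
          exact hnd (Nat.dvd_of_mod_eq_zero (by omega))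
        rw [PrimaryNumbersLoop, if_pos hjc, if_neg hrest]
        exact ih (j + 1) (by omega) (by omega) (fun k hk1 hk2 => hmin k (by omega) hk2)

-- main bridge: B's loop from prev equals A's scan from prev + 1
theorem loop_eq : ∀ n cur prev, cur + (cur - prev) ≤ n →
    altLoop cur prev = PrimaryNumbersLoop cur (prev + 1) := by
  intro n
  induction n with
  | zero =>
      intro cur prev hn
      have hc : cur = 0 := by omega
      subst hc
      rw [altLoop, if_neg (by omega), PrimaryNumbersLoop, if_neg (by omega)]
  | succ m ih =>
      intro cur prev hn
      rcases Nat.lt_or_ge prev cur with h | h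
      · obtain ⟨hb1, hb2, hb3⟩ := best_spec cur prev h
        have hbc : bestLoop cur prev 1 cur ≤ cur := Nat.le_of_dvd (by omega) hb2
        have hmod : cur % bestLoop cur prev 1 cur = 0 :=
          Nat.mod_eq_zero_of_dvd hb2
        have hrest : cur - cur / bestLoop cur prev 1 cur * bestLoop cur prev 1 cur = 0 := by
          have hdm := Nat.div_add_mod cur (bestLoop cur prev 1 cur)
          have hcm : bestLoop cur prev 1 cur * (cur / bestLoop cur prev 1 cur)
              = cur / bestLoop cur prev 1 cur * bestLoop cur prev 1 cur := Nat.mul_comm _ _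
          omega
        rw [altLoop, if_pos h]
        rw [ALoop_step cur (bestLoop cur prev 1 cur) hbc (bestLoop cur prev 1 cur - (prev + 1))
          (prev + 1) (by omega) (by omega)
          (fun k hk1 hk2 hkd => absurd (hb3 k (by omega) hkd) (by omega))]
        rw [PrimaryNumbersLoop, if_pos hbc, if_pos hrest]
        have htail : altLoop (cur / bestLoop cur prev 1 cur) (bestLoop cur prev 1 cur)
            = PrimaryNumbersLoop (cur / bestLoop cur prev 1 cur) (bestLoop cur prev 1 cur + 1) := by
          apply ih
          rcases Nat.lt_or_ge (bestLoop cur prev 1 cur) 2 with hb | hb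
          · have hb1' : bestLoop cur prev 1 cur = 1 := by omega
            rw [hb1', Nat.div_one]
            omega
          · have h1 : cur / bestLoop cur prev 1 cur ≤ cur / 2 := Nat.div_le_div_left hb (by omega)
            have h2 := Nat.div_mul_le_self cur 2
            omega
        rw [htail]
      · rw [altLoop, if_neg (by omega), PrimaryNumbersLoop, if_neg (by omega)]

-- ===== VERDICT (by name: the statement is the Claim_ definition above) =====
theorem PrimaryNumbers_spec : Claim_equal_PrimaryNumbers := by
  intro number _
  unfold Spec_PrimaryNumbers PrimaryNumbers PrimaryNumbers_alt
  exact (loop_eq (number.toNat + number.toNat) number.toNat 0 (by omega)).symm
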